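-- pv_equiv track=rewrite | github.com/bazanazaB/IA | RAG/Proyecto 3/src/preprocessing/limpieza.py | inferir_sentimiento
-- ===== SOURCE A (Python) =====
-- def inferir_sentimiento(texto):
--     negativos = [
--         "ansiedad", "depresion", "vacio", "agotamiento",
--         "burnout", "miedo", "soledad", "control"
--     ]
--     for palabra in negativos:
--         if palabra in texto:
--             return "negativo"
--     return "neutral"
-- ===== SOURCE B (Python) =====
-- NEGATIVOS = ("ansiedad", "depresion", "vacio", "agotamiento",
--              "burnout", "miedo", "soledad", "control")
--
-- def inferir_sentimiento(texto):
--     # single left-to-right scan over positions: at each position ask whether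
--     # some keyword starts there
--     for i in range(len(texto)):
--         suf = texto[i:]
--         if any(suf.startswith(k) for k in NEGATIVOS):
--             return "negativo"
--     return "neutral"
-- ===== Notes on version B (the rewrite author's own statement) =====
-- stated objective: alternative
-- what changed: B replaces A's eight independent substring searches ('palabra in texto' per keyword) by one left-to-right scan over the text's positions, asking at each position whether any keyword starts there.
import Mathlib
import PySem

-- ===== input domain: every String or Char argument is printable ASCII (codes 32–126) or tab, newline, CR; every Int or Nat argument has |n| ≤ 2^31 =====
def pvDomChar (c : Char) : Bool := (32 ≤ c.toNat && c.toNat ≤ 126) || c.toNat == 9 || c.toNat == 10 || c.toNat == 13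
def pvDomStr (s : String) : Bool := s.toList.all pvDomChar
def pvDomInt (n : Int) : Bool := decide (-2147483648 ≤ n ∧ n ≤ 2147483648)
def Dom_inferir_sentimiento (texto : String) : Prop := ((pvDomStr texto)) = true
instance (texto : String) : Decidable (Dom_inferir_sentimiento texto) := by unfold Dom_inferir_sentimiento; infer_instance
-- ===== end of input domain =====

-- B replaces A's eight independent substring searches by one left-to-right scan over
-- the text's positions, asking at each position whether any keyword starts there
-- (objective: alternative). Return-value equivalence; neither version mutates input.

-- ===== PORT A =====
-- the for-loop over the keyword list with early return
def pvLoopA (texto : String) : List String → String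
  | [] => "neutral"
  | palabra :: rest => if PySem.Str.isIn palabra texto then "negativo" else pvLoopA texto rest

def inferir_sentimiento (texto : String) : String :=
  pvLoopA texto ["ansiedad", "depresion", "vacio", "agotamiento",
                 "burnout", "miedo", "soledad", "control"]

-- ===== PORT B =====
def pvNegativos : List (List Char) :=
  ["ansiedad".toList, "depresion".toList, "vacio".toList, "agotamiento".toList,
   "burnout".toList, "miedo".toList, "soledad".toList, "control".toList]

-- 'for i in range(len(texto)): if any(texto[i:].startswith(k) …)': scan the suffixes
def pvScan : List Char → Bool
  | [] => false
  | c :: t => pvNegativos.any (fun k => PySem.Chars.startswith (c :: t) k) || pvScan t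

def inferir_sentimiento_alt (texto : String) : String :=
  if pvScan texto.toList then "negativo" else "neutral"

-- ===== PRECONDITION & SPEC =====
def Spec_inferir_sentimiento (texto : String) (out : String) : Prop := out = inferir_sentimiento_alt texto
instance (texto : String) (out : String) : Decidable (Spec_inferir_sentimiento texto out) := by unfold Spec_inferir_sentimiento; infer_instance

-- ===== CLAIM (what is proved, stated in full; the proofs are below) =====
def Claim_equal_inferir_sentimiento : Prop := ∀ (texto : String), Dom_inferir_sentimiento texto → Spec_inferir_sentimiento texto (inferir_sentimiento texto)

-- ===== LEMMAS AND PROOFS =====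

-- the position scan finds exactly the texts containing some (nonempty) keyword as infix
theorem pvScan_iff (cs : List Char) :
    pvScan cs = true ↔ ∃ k ∈ pvNegativos, k <:+: cs := by
  induction cs with
  | nil =>
    simp only [pvScan]
    constructor
    · intro h; cases h
    · rintro ⟨k, hk, hinf⟩
      rw [List.infix_nil] at hinf
      subst hinf
      simp [pvNegativos] at hk
  | cons c t ih =>
    simp only [pvScan, Bool.or_eq_true, List.any_eq_true, ih,
      PySem.Chars.startswith_iff, List.infix_cons_iff]
    constructor
    · rintro (⟨k, hk, h⟩ | ⟨k, hk, h⟩) <;> exact ⟨k, hk, by tauto⟩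
    · rintro ⟨k, hk, h | h⟩
      · exact Or.inl ⟨k, hk, h⟩
      · exact Or.inr ⟨k, hk, h⟩

-- the keyword loop is the any-test over the keyword list
theorem pvLoopA_eq (texto : String) (ks : List String) :
    pvLoopA texto ks =
      if ks.any (fun k => PySem.Str.isIn k texto) then "negativo" else "neutral" := by
  induction ks with
  | nil => simp [pvLoopA]
  | cons p rest ih =>
    by_cases h : PySem.Chars.isIn p.toList texto.toList = true <;>
      simp [pvLoopA, h, ih, List.any_cons]

-- both any-tests describe the same set of texts
theorem pvAny_iff_scan (texto : String) :
    (["ansiedad", "depresion", "vacio", "agotamiento",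
      "burnout", "miedo", "soledad", "control"] : List String).any
        (fun k => PySem.Str.isIn k texto) = pvScan texto.toList := by
  rw [Bool.eq_iff_iff, pvScan_iff]
  simp only [List.any_eq_true, List.mem_cons, List.not_mem_nil, or_false,
    PySem.Str.isIn_eq, PySem.Chars.isIn_iff_infix, pvNegativos]
  constructor
  · rintro ⟨k, hk, hinf⟩
    rcases hk with h1|h1|h1|h1|h1|h1|h1|h1 <;> subst h1 <;> exact ⟨_, by simp, hinf⟩
  · rintro ⟨k, hk, hinf⟩
    rcases hk with h1|h1|h1|h1|h1|h1|h1|h1 <;> subst h1 <;> exact ⟨_, by simp, hinf⟩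

-- ===== VERDICT (by name: the statement is the Claim_ definition above) =====
theorem inferir_sentimiento_spec : Claim_equal_inferir_sentimiento := by
  intro texto _
  unfold Spec_inferir_sentimiento inferir_sentimiento inferir_sentimiento_alt
  rw [pvLoopA_eq, pvAny_iff_scan]
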